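-- pv_equiv track=rewrite | github.com/szapf70/codecomp | faw/002_kvb_opendata/loesungen/helmut/kvb_functions.py | count_operation_category
-- ===== SOURCE A (Python) =====
-- def count_operation_category(station_area_ds):
--     count_bus = 0
--     count_tram = 0
--     count_both = 0
--     count_none = 0
--
--     for _, station_area in station_area_ds.items():
--         operation_category = set(station_area['Betriebsbereich'])
--         if 'BUS' in operation_category and 'STRAB' in operation_category:
--             count_both += 1
--         elif 'BUS' in operation_category:
--             count_bus += 1
--         elif 'STRAB' in operation_category:
--             count_tram += 1
--         else:
--             count_none += 1
--
--     return count_bus, count_tram, count_both, count_none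
-- ===== SOURCE B (Python) =====
-- def count_operation_category(station_area_ds):
--     vals = [sa['Betriebsbereich'] for sa in station_area_ds.values()]
--     bus_any = sum('BUS' in v for v in vals)
--     tram_any = sum('STRAB' in v for v in vals)
--     both = sum('BUS' in v and 'STRAB' in v for v in vals)
--     return (bus_any - both, tram_any - both, both,
--             len(vals) - bus_any - tram_any + both)
-- ===== Notes on version B (the rewrite author's own statement) =====
-- stated objective: alternative
-- what changed: Replaces the single classifying loop with four counters by staged passes (counts of 'BUS', of 'STRAB', and of both) combined arithmetically by inclusion-exclusion; no set() and no per-station four-way branch.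
import Mathlib
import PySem

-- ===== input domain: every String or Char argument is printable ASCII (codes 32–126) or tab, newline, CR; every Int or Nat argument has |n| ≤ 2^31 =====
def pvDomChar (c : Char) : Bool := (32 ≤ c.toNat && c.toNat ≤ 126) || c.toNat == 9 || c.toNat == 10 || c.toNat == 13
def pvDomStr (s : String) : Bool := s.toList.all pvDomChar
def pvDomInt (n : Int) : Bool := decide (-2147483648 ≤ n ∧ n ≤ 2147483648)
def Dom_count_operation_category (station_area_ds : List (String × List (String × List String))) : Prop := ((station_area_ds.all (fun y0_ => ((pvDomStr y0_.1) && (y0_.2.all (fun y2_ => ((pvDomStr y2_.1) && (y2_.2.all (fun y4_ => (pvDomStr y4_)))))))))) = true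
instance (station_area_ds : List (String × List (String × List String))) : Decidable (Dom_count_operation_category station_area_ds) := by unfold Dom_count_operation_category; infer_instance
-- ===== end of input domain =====

-- B replaces A's single classifying loop (set + if/elif chain into four counters) by staged
-- membership counts combined arithmetically by inclusion-exclusion (objective: alternative).

-- ===== PORT A =====
-- A: four Int counters, a set of the categories per station, an if/elif chain.
def count_operation_category (station_area_ds : List (String × List (String × List String))) : Int × Int × Int × Int :=
  let r := station_area_ds.foldl
    (fun (acc : Int × Int × Int × Int) kv =>
      -- station_area['Betriebsbereich']: KeyError (excluded by Pre_) when absent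
      let vals := (kv.2.lookup "Betriebsbereich").getD []
      let operation_category := PySem.Set.ofList vals
      if operation_category.contains "BUS" && operation_category.contains "STRAB" then
        (acc.1, acc.2.1, acc.2.2.1 + 1, acc.2.2.2)
      else if operation_category.contains "BUS" then
        (acc.1 + 1, acc.2.1, acc.2.2.1, acc.2.2.2)
      else if operation_category.contains "STRAB" then
        (acc.1, acc.2.1 + 1, acc.2.2.1, acc.2.2.2)
      else
        (acc.1, acc.2.1, acc.2.2.1, acc.2.2.2 + 1))
    (0, 0, 0, 0)
  r

-- ===== PORT B =====
-- B: staged passes (list of value lists, three membership counts), then inclusion-exclusion.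
def count_operation_category_alt (station_area_ds : List (String × List (String × List String))) : Int × Int × Int × Int :=
  let vals := station_area_ds.map (fun kv => (kv.2.lookup "Betriebsbereich").getD [])
  let bus_any : Int := vals.countP (fun v => v.contains "BUS")
  let tram_any : Int := vals.countP (fun v => v.contains "STRAB")
  let both : Int := vals.countP (fun v => v.contains "BUS" && v.contains "STRAB")
  (bus_any - both, tram_any - both, both,
   (vals.length : Int) - bus_any - tram_any + both)

-- ===== PRECONDITION & SPEC =====
-- Pre_ excludes exactly the inputs where some station dict lacks the key
-- 'Betriebsbereich', on which A raises KeyError.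
def Pre_count_operation_category (station_area_ds : List (String × List (String × List String))) : Prop :=
  ∀ kv ∈ station_area_ds, (kv.2.lookup "Betriebsbereich").isSome = true
instance (station_area_ds : List (String × List (String × List String))) : Decidable (Pre_count_operation_category station_area_ds) := by unfold Pre_count_operation_category; infer_instance

def pvWitness_count_operation_category : (List (String × List (String × List String))) :=
  [("Dom", [("Betriebsbereich", ["BUS", "STRAB"])]),
   ("Zoo", [("Betriebsbereich", ["BUS"])]),
   ("Neumarkt", [("Betriebsbereich", [])])]

def Spec_count_operation_category (station_area_ds : List (String × List (String × List String))) (out : Int × Int × Int × Int) : Prop := out = count_operation_category_alt station_area_ds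
instance (station_area_ds : List (String × List (String × List String))) (out : Int × Int × Int × Int) : Decidable (Spec_count_operation_category station_area_ds out) := by unfold Spec_count_operation_category; infer_instance

-- ===== CLAIM (what is proved, stated in full; the proofs are below) =====
def Claim_equal_count_operation_category : Prop := ∀ (station_area_ds : List (String × List (String × List String))), Dom_count_operation_category station_area_ds → Pre_count_operation_category station_area_ds → Spec_count_operation_category station_area_ds (count_operation_category station_area_ds)

-- ===== LEMMAS AND PROOFS =====

def pvVal (kv : String × List (String × List String)) : List String :=
  (kv.2.lookup "Betriebsbereich").getD []

-- A's fold, characterised: each component counts the stations in its exclusive class.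
theorem A_foldl_counts (l : List (String × List (String × List String)))
    (b t bo n : Int) :
    l.foldl
      (fun (acc : Int × Int × Int × Int) kv =>
        let vals := (kv.2.lookup "Betriebsbereich").getD []
        let operation_category := PySem.Set.ofList vals
        if operation_category.contains "BUS" && operation_category.contains "STRAB" then
          (acc.1, acc.2.1, acc.2.2.1 + 1, acc.2.2.2)
        else if operation_category.contains "BUS" then
          (acc.1 + 1, acc.2.1, acc.2.2.1, acc.2.2.2)
        else if operation_category.contains "STRAB" then
          (acc.1, acc.2.1 + 1, acc.2.2.1, acc.2.2.2)
        else
          (acc.1, acc.2.1, acc.2.2.1, acc.2.2.2 + 1))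
      (b, t, bo, n)
    = (b + ((l.map pvVal).countP (fun v => v.contains "BUS" && !v.contains "STRAB") : Int),
       t + ((l.map pvVal).countP (fun v => !v.contains "BUS" && v.contains "STRAB") : Int),
       bo + ((l.map pvVal).countP (fun v => v.contains "BUS" && v.contains "STRAB") : Int),
       n + ((l.map pvVal).countP (fun v => !v.contains "BUS" && !v.contains "STRAB") : Int)) := by
  induction l generalizing b t bo n with
  | nil => simp
  | cons kv rest ih =>
    have hB : (PySem.Set.ofList (pvVal kv)).contains "BUS" = (pvVal kv).contains "BUS" := by
      simp [PySem.Set.contains_eq_listContains, PySem.Set.mem_ofList]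
    have hS : (PySem.Set.ofList (pvVal kv)).contains "STRAB" = (pvVal kv).contains "STRAB" := by
      simp [PySem.Set.contains_eq_listContains, PySem.Set.mem_ofList]
    simp only [List.foldl_cons, List.map_cons, List.countP_cons]
    show _ = _
    cases hb : (pvVal kv).contains "BUS" <;> cases hs : (pvVal kv).contains "STRAB" <;>
      simp only [pvVal] at hb hs hB hS <;>
      simp only [hB, hS, hb, hs, Bool.and_self, Bool.and_false, Bool.false_and, Bool.and_true,
        Bool.true_and, Bool.not_true, Bool.not_false, Bool.false_eq_true, if_true, if_false, ih] <;>
      simp <;> omega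

-- splitting a countP by a second predicate
theorem countP_split {α : Type} (l : List α) (p q : α → Bool) :
    l.countP p = l.countP (fun x => p x && q x) + l.countP (fun x => p x && !q x) := by
  induction l with
  | nil => simp
  | cons x xs ih =>
    simp only [List.countP_cons]
    cases hp : p x <;> cases hq : q x <;> simp [hp, ih] <;> omega

theorem count_operation_category_eq_alt (l : List (String × List (String × List String))) :
    count_operation_category l = count_operation_category_alt l := by
  unfold count_operation_category count_operation_category_alt
  rw [A_foldl_counts]
  have hvals : l.map (fun kv => (kv.2.lookup "Betriebsbereich").getD []) = l.map pvVal := rfl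
  rw [hvals]
  have h1 := countP_split (l.map pvVal) (fun v => v.contains "BUS") (fun v => v.contains "STRAB")
  have h2 := countP_split (l.map pvVal) (fun v => v.contains "STRAB") (fun v => v.contains "BUS")
  have h3 := countP_split (l.map pvVal) (fun _ => true) (fun v => v.contains "BUS")
  simp only [Bool.true_and] at h3
  have h4 := countP_split (l.map pvVal)
      (fun v => !v.contains "BUS") (fun v => v.contains "STRAB")
  have hlen : (l.map pvVal).countP (fun _ => true) = (l.map pvVal).length := by
    simp [List.countP_true]
  have hc2 : (l.map pvVal).countP (fun v => v.contains "STRAB" && v.contains "BUS")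
      = (l.map pvVal).countP (fun v => v.contains "BUS" && v.contains "STRAB") := by
    apply List.countP_congr; intro x _; simp [Bool.and_comm]
  have hc3 : (l.map pvVal).countP (fun v => v.contains "STRAB" && !v.contains "BUS")
      = (l.map pvVal).countP (fun v => !v.contains "BUS" && v.contains "STRAB") := by
    apply List.countP_congr; intro x _; simp [Bool.and_comm]
  simp only [Prod.mk.injEq]
  refine ⟨?_, ?_, ?_, ?_⟩ <;> push_cast <;> omega

-- ===== VERDICT (by name: the statement is the Claim_ definition above) =====
theorem count_operation_category_spec : Claim_equal_count_operation_category := by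
  intro l _ _
  unfold Spec_count_operation_category
  exact (count_operation_category_eq_alt l)
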